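-- pv_equiv track=rewrite | github.com/programadorwho/PythonCode | hamming.py | xy_xn
-- ===== SOURCE A (Python) =====
-- def xy_xn(x, codigo_h):
--     x1 = x
--     x2 = x
--     i = 0
--     for value in range(x - 1, len(codigo_h)):
--         if x > 0:
--             if codigo_h[value] == "1":
--                 i += 1
--             x -= 1
--         else:
--             if x1 > 0:
--                 x1 -= 1
--                 if x1 == 0:
--                     x = x2
--                     x1 = x2
--     return i
-- ===== SOURCE B (Python) =====
-- def xy_xn(x, codigo_h):
--     # Stateless single pass: index j belongs to an "examine" block iff the
--     # zero-based block number (j - (x-1)) // x is even.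
--     if x <= 0:
--         return 0
--     i = 0
--     for j in range(x - 1, len(codigo_h)):
--         if ((j - (x - 1)) // x) % 2 == 0 and codigo_h[j] == "1":
--             i += 1
--     return i
-- ===== Notes on version B (the rewrite author's own statement) =====
-- stated objective: simpler
-- what changed: Replaces A's three-variable countdown state machine with a stateless pass that decides examine/skip-block membership arithmetically via ((j-(x-1))//x) % 2.
import Mathlib
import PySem

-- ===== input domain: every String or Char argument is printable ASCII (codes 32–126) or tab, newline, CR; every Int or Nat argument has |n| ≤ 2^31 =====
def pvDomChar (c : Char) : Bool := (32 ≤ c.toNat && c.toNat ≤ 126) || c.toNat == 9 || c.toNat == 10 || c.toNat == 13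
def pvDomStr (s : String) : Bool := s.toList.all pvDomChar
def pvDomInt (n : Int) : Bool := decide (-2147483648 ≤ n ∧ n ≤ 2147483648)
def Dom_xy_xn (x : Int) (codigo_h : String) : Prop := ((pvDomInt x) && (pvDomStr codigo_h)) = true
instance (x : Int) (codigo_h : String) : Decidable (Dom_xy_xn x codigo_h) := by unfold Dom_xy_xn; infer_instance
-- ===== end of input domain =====

-- B replaces A's three-variable countdown state machine with a stateless pass deciding
-- examine/skip-block membership arithmetically; objective: simpler (same O(n) cost).

-- ===== PORT A =====
-- loop body of A: state is (x, x1, i); x2 is the saved initial x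
def xyStepA (x2 : Int) (cs : List Char) (st : Int × Int × Int) (value : Int) : Int × Int × Int :=
  if st.1 > 0 then
    (st.1 - 1, st.2.1, if PySem.List.pyGet? cs value = some '1' then st.2.2 + 1 else st.2.2)
  else
    if st.2.1 > 0 then
      if st.2.1 - 1 = 0 then (x2, x2, st.2.2) else (st.1, st.2.1 - 1, st.2.2)
    else st

def xy_xn (x : Int) (codigo_h : String) : Int :=
  ((PySem.List.pyRange (x - 1) (PySem.Str.len codigo_h) 1).foldl
    (xyStepA x codigo_h.toList) (x, x, 0)).2.2

-- ===== PORT B =====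
-- loop body of B: stateless, counts j with even block number that hold '1'
def xyStepB (x : Int) (cs : List Char) (i : Int) (j : Int) : Int :=
  if PySem.Int.mod (PySem.Int.floordiv (j - (x - 1)) x) 2 = 0 ∧ PySem.List.pyGet? cs j = some '1'
  then i + 1 else i

def xy_xn_alt (x : Int) (codigo_h : String) : Int :=
  if x ≤ 0 then 0
  else (PySem.List.pyRange (x - 1) (PySem.Str.len codigo_h) 1).foldl
        (xyStepB x codigo_h.toList) 0

-- ===== PRECONDITION & SPEC =====
def Spec_xy_xn (x : Int) (codigo_h : String) (out : Int) : Prop := out = xy_xn_alt x codigo_h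
instance (x : Int) (codigo_h : String) (out : Int) : Decidable (Spec_xy_xn x codigo_h out) := by unfold Spec_xy_xn; infer_instance

-- ===== CLAIM (what is proved, stated in full; the proofs are below) =====
def Claim_equal_xy_xn : Prop := ∀ (x : Int) (codigo_h : String), Dom_xy_xn x codigo_h → Spec_xy_xn x codigo_h (xy_xn x codigo_h)

-- ===== LEMMAS AND PROOFS =====

-- A's state at the moment index (x2-1)+d is processed, with count i
def xyStA (x2 d i : Int) : Int × Int × Int :=
  if (d / x2) % 2 = 0 then (x2 - d % x2, x2, i) else (0, x2 - d % x2, i)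

lemma xyStA_snd (x2 d i : Int) : (xyStA x2 d i).2.2 = i := by
  unfold xyStA; split_ifs <;> rfl

-- with x ≤ 0 the whole state is a fixed point of A's loop body
lemma xyStepA_fix (x2 : Int) (cs : List Char) (l : List Int) (st : Int × Int × Int)
    (h1 : st.1 ≤ 0) (h2 : st.2.1 ≤ 0) : l.foldl (xyStepA x2 cs) st = st := by
  induction l with
  | nil => rfl
  | cons a l ih =>
      have : xyStepA x2 cs st a = st := by
        unfold xyStepA
        rw [if_neg (by omega), if_neg (by omega)]
      simp [List.foldl_cons, this, ih]

-- one step of A from the invariant state equals one step of B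
lemma xyStep_trans (x2 : Int) (hx : 0 < x2) (cs : List Char) (d i a : Int)
    (_hd : 0 ≤ d) (ha : a - (x2 - 1) = d) :
    xyStepA x2 cs (xyStA x2 d i) a = xyStA x2 (d + 1) (xyStepB x2 cs i a) := by
  obtain ⟨q, r, hqr, hrlo, hrhi, hq, hr⟩ :
      ∃ q r, x2 * q + r = d ∧ 0 ≤ r ∧ r < x2 ∧ d / x2 = q ∧ d % x2 = r :=
    ⟨d / x2, d % x2, Int.mul_ediv_add_emod d x2, Int.emod_nonneg d (by omega),
     Int.emod_lt_of_pos d hx, rfl, rfl⟩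
  have hstepB : xyStepB x2 cs i a
      = if q % 2 = 0 ∧ PySem.List.pyGet? cs a = some '1' then i + 1 else i := by
    unfold xyStepB
    rw [PySem.Int.floordiv_eq_ediv_of_pos hx, PySem.Int.mod_eq_emod_of_pos (by omega), ha, hq]
  by_cases hlast : r = x2 - 1
  · have h1 : d + 1 = (q + 1) * x2 := by
      have e : (q + 1) * x2 = x2 * q + x2 := by ring
      linarith
    have hdiv : (d + 1) / x2 = q + 1 := by
      rw [h1, Int.mul_ediv_cancel _ (by omega)]
    have hmod : (d + 1) % x2 = 0 := by
      rw [Int.emod_def, hdiv]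
      have e : x2 * (q + 1) = (q + 1) * x2 := by ring
      linarith
    unfold xyStA xyStepA
    rw [hq, hr, hdiv, hmod, hstepB]
    split_ifs <;> (try dsimp only at *) <;> (try simp only [Prod.mk.injEq, and_true, true_and]) <;> first | tauto | omega
  · have h1 : d + 1 = (r + 1) + q * x2 := by
      have e : q * x2 = x2 * q := by ring
      linarith
    have hdiv : (d + 1) / x2 = q := by
      rw [h1, Int.add_mul_ediv_right _ _ (by omega : x2 ≠ 0),
        Int.ediv_eq_zero_of_lt (by omega) (by omega), zero_add]
    have hmod : (d + 1) % x2 = r + 1 := by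
      rw [Int.emod_def, hdiv]
      have e : q * x2 = x2 * q := by ring
      linarith
    unfold xyStA xyStepA
    rw [hq, hr, hdiv, hmod, hstepB]
    split_ifs <;> (try dsimp only at *) <;> (try simp only [Prod.mk.injEq, and_true, true_and]) <;> first | tauto | omega

-- main invariant over the remaining range
lemma xy_main (x2 : Int) (hx : 0 < x2) (cs : List Char) :
    ∀ n : Nat, ∀ a b i : Int, (b - a).toNat ≤ n → x2 - 1 ≤ a →
      ((PySem.List.pyRange a b 1).foldl (xyStepA x2 cs) (xyStA x2 (a - (x2 - 1)) i)).2.2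
        = (PySem.List.pyRange a b 1).foldl (xyStepB x2 cs) i := by
  intro n
  induction n with
  | zero =>
      intro a b i hn ha
      rw [PySem.List.pyRange_one_eq_nil (by omega)]
      simp [xyStA_snd]
  | succ n ih =>
      intro a b i hn ha
      by_cases hab : a < b
      · rw [PySem.List.pyRange_one_cons hab]
        simp only [List.foldl_cons]
        rw [xyStep_trans x2 hx cs (a - (x2 - 1)) i a (by omega) rfl]
        have := ih (a + 1) b (xyStepB x2 cs i a) (by omega) (by omega)
        have harw : (a + 1) - (x2 - 1) = (a - (x2 - 1)) + 1 := by ring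
        rwa [harw] at this
      · rw [PySem.List.pyRange_one_eq_nil (by omega)]
        simp [xyStA_snd]

-- ===== VERDICT (by name: the statement is the Claim_ definition above) =====
theorem xy_xn_spec : Claim_equal_xy_xn := by
  intro x codigo_h _
  unfold Spec_xy_xn xy_xn xy_xn_alt
  by_cases hx : x ≤ 0
  · rw [if_pos hx, xyStepA_fix x codigo_h.toList _ (x, x, 0) hx hx]
  · rw [if_neg hx]
    have hst : xyStA x ((x - 1) - (x - 1)) 0 = (x, x, 0) := by
      unfold xyStA
      norm_num
    have := xy_main x (by omega) codigo_h.toList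
      ((PySem.Str.len codigo_h - (x - 1)).toNat) (x - 1) (PySem.Str.len codigo_h) 0 (le_refl _) (le_refl _)
    rw [hst] at this
    exact this
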